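-- pv_equiv track=rewrite | github.com/Leao-marinho/HackerRank_python | validating_credit_card_numbers.py | rule6
-- ===== SOURCE A (Python) =====
-- def rule6(astring):
--     new_astring = astring.split("-")
--     new_astring = "".join(new_astring)
--     for i in range(0, len(new_astring)):
--         for j in range(i+1, len(new_astring)):
--             for k in range(j+1, len(new_astring)):
--                 for n in range(k+1, len(new_astring)):
--                     if(new_astring[i] == new_astring[j]
--                         and new_astring[j] == new_astring[k]
--                         and new_astring[k] == new_astring[n]):
--                         return False
--                     break
--                 break
--             break
--     return True
-- ===== SOURCE B (Python) =====
-- def rule6(astring):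
--     s = "".join(astring.split("-"))
--     run = 0
--     prev = None
--     for c in s:
--         run = run + 1 if c == prev else 1
--         prev = c
--         if run == 4:
--             return False
--     return True
-- ===== Notes on version B (the rewrite author's own statement) =====
-- stated objective: simpler
-- what changed: A's four nested index loops (which the breaks reduce to a fixed 4-char window comparison at each position) are replaced by a single run-length scan that maintains the length of the current run of equal characters and fails as soon as a run reaches 4.
import Mathlib
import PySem

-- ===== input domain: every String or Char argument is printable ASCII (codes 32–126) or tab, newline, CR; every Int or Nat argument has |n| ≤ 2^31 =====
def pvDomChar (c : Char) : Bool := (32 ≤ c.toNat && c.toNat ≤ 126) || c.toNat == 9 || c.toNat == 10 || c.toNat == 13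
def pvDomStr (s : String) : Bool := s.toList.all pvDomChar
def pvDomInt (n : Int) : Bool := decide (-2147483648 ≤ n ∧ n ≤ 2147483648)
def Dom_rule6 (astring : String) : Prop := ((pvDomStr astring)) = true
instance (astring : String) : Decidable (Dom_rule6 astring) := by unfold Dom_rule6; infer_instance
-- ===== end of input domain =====

-- B replaces A's four nested index loops (reduced by the breaks to a fixed 4-char window test) by a single run-length scan; objective: simpler.

-- ===== PORT A =====
-- outer 'for i in range(0, len)'; each inner loop ('for j in range(i+1, len)' …) runs its body
-- at most once because of the trailing 'break': an empty range skips to the next i.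
def rule6Go (s : List Char) (L : Int) : List Int → Bool
  | [] => true
  | i :: rest =>
    match PySem.List.pyRange (i + 1) L 1 with
    | [] => rule6Go s L rest
    | j :: _ =>
      match PySem.List.pyRange (j + 1) L 1 with
      | [] => rule6Go s L rest
      | k :: _ =>
        match PySem.List.pyRange (k + 1) L 1 with
        | [] => rule6Go s L rest
        | n :: _ =>
          if PySem.List.pyGet? s i = PySem.List.pyGet? s j ∧
             PySem.List.pyGet? s j = PySem.List.pyGet? s k ∧
             PySem.List.pyGet? s k = PySem.List.pyGet? s n
          then false
          else rule6Go s L rest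

def rule6 (astring : String) : Bool :=
  let new_astring := PySem.Chars.join [] (PySem.Chars.splitOn astring.toList ['-'])
  rule6Go new_astring (new_astring.length : Int) (PySem.List.pyRange 0 (new_astring.length : Int) 1)

-- ===== PORT B =====
-- run-length scan: run = length of the current run of equal characters, prev = previous character.
def rule6AltGo : List Char → Int → Option Char → Bool
  | [], _, _ => true
  | c :: rest, run, prev =>
    let run' := if some c = prev then run + 1 else 1
    if run' = 4 then false else rule6AltGo rest run' (some c)

def rule6_alt (astring : String) : Bool :=
  let s := PySem.Chars.join [] (PySem.Chars.splitOn astring.toList ['-'])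
  rule6AltGo s 0 none

-- ===== PRECONDITION & SPEC =====
def Spec_rule6 (astring : String) (out : Bool) : Prop := out = rule6_alt astring
instance (astring : String) (out : Bool) : Decidable (Spec_rule6 astring out) := by unfold Spec_rule6; infer_instance

-- ===== CLAIM (what is proved, stated in full; the proofs are below) =====
def Claim_equal_rule6 : Prop := ∀ (astring : String), Dom_rule6 astring → Spec_rule6 astring (rule6 astring)

-- ===== LEMMAS AND PROOFS =====

-- "no window of 4 consecutive equal characters": the common characterisation both ports are reduced to
def winCheck : List Char → Bool
  | a :: b :: c :: d :: rest => if a = b ∧ b = c ∧ c = d then false else winCheck (b :: c :: d :: rest)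
  | _ => true

lemma winCheck_short (l : List Char) (h : l.length < 4) : winCheck l = true := by
  match l, h with
  | [], _ => rfl
  | [_], _ => rfl
  | [_, _], _ => rfl
  | [_, _, _], _ => rfl

lemma rule6Go_eq_winCheck (s : List Char) :
    ∀ k i : Nat, s.length ≤ i + k →
      rule6Go s (s.length : Int) (PySem.List.pyRange (i : Int) (s.length : Int) 1)
        = winCheck (s.drop i) := by
  intro k
  induction k with
  | zero =>
    intro i hi
    rw [PySem.List.pyRange_one_eq_nil (by exact_mod_cast by omega)]
    rw [List.drop_eq_nil_of_le (by omega)]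
    rfl
  | succ k ih =>
    intro i hi
    by_cases hlt : i < s.length
    · have hout : PySem.List.pyRange (i : Int) (s.length : Int) 1
          = (i : Int) :: PySem.List.pyRange (((i + 1 : Nat) : Int)) (s.length : Int) 1 := by
        rw [PySem.List.pyRange_one_cons (by exact_mod_cast hlt)]
        norm_num
      by_cases h1 : i + 1 < s.length
      · have hr1 : PySem.List.pyRange ((i : Int) + 1) (s.length : Int) 1
            = ((i + 1 : Nat) : Int) :: PySem.List.pyRange (((i + 1 : Nat) : Int) + 1) (s.length : Int) 1 := by
          rw [show ((i : Int) + 1) = ((i + 1 : Nat) : Int) by omega]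
          exact PySem.List.pyRange_one_cons (by exact_mod_cast h1)
        by_cases h2 : i + 2 < s.length
        · have hr2 : PySem.List.pyRange (((i + 1 : Nat) : Int) + 1) (s.length : Int) 1
              = ((i + 2 : Nat) : Int) :: PySem.List.pyRange (((i + 2 : Nat) : Int) + 1) (s.length : Int) 1 := by
            rw [show (((i + 1 : Nat) : Int) + 1) = ((i + 2 : Nat) : Int) by omega]
            exact PySem.List.pyRange_one_cons (by exact_mod_cast h2)
          by_cases h3 : i + 3 < s.length
          · have hr3 : PySem.List.pyRange (((i + 2 : Nat) : Int) + 1) (s.length : Int) 1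
                = ((i + 3 : Nat) : Int) :: PySem.List.pyRange (((i + 3 : Nat) : Int) + 1) (s.length : Int) 1 := by
              rw [show (((i + 2 : Nat) : Int) + 1) = ((i + 3 : Nat) : Int) by omega]
              exact PySem.List.pyRange_one_cons (by exact_mod_cast h3)
            rw [hout]
            simp only [rule6Go, hr1, hr2, hr3, PySem.List.pyGet?_natCast]
            rw [List.getElem?_eq_getElem hlt, List.getElem?_eq_getElem h1,
                List.getElem?_eq_getElem h2, List.getElem?_eq_getElem h3]
            have hdrop : s.drop i = s[i] :: s[i+1] :: s[i+2] :: s[i+3] :: s.drop (i+4) := by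
              rw [List.drop_eq_getElem_cons hlt, List.drop_eq_getElem_cons h1,
                  List.drop_eq_getElem_cons h2, List.drop_eq_getElem_cons h3]
            rw [hdrop]
            by_cases hc : s[i] = s[i+1] ∧ s[i+1] = s[i+2] ∧ s[i+2] = s[i+3]
            · rw [if_pos (by simpa using hc)]
              unfold winCheck
              rw [if_pos hc]
            · rw [if_neg (by simpa using hc)]
              unfold winCheck
              rw [if_neg hc]
              rw [← List.drop_eq_getElem_cons h3, ← List.drop_eq_getElem_cons h2,
                  ← List.drop_eq_getElem_cons h1]
              exact ih (i + 1) (by omega)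
          · have hr3 : PySem.List.pyRange (((i + 2 : Nat) : Int) + 1) (s.length : Int) 1 = [] := by
              apply PySem.List.pyRange_one_eq_nil
              push_cast; omega
            rw [hout]
            simp only [rule6Go, hr1, hr2, hr3]
            rw [ih (i + 1) (by omega), winCheck_short _ (by simp; omega),
                winCheck_short _ (by simp; omega)]
        · have hr2 : PySem.List.pyRange (((i + 1 : Nat) : Int) + 1) (s.length : Int) 1 = [] := by
            apply PySem.List.pyRange_one_eq_nil
            push_cast; omega
          rw [hout]
          simp only [rule6Go, hr1, hr2]
          rw [ih (i + 1) (by omega), winCheck_short _ (by simp; omega),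
              winCheck_short _ (by simp; omega)]
      · have hr1 : PySem.List.pyRange ((i : Int) + 1) (s.length : Int) 1 = [] := by
          apply PySem.List.pyRange_one_eq_nil
          omega
        rw [hout]
        simp only [rule6Go, hr1]
        rw [ih (i + 1) (by omega), winCheck_short _ (by simp; omega),
            winCheck_short _ (by simp; omega)]
    · rw [PySem.List.pyRange_one_eq_nil (by exact_mod_cast by omega)]
      rw [List.drop_eq_nil_of_le (by omega)]
      rfl

lemma winCheck_cons_of_ne {a b : Char} (hab : ¬ a = b) (l : List Char) :
    winCheck (a :: b :: l) = winCheck (b :: l) := by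
  match l with
  | [] => rfl
  | [_] => rfl
  | x :: y :: l' => simp [winCheck, hab]

lemma winCheck_cons2_of_ne {a b : Char} (hab : ¬ a = b) (l : List Char) :
    winCheck (a :: a :: b :: l) = winCheck (a :: b :: l) := by
  match l with
  | [] => rfl
  | x :: l' => simp [winCheck, hab]

lemma winCheck_cons3_of_ne {a b : Char} (hab : ¬ a = b) (l : List Char) :
    winCheck (a :: a :: a :: b :: l) = winCheck (a :: a :: b :: l) := by
  simp [winCheck, hab]

lemma winCheck_replicate_ne (p c : Char) (hne : c ≠ p) (rest : List Char) :
    ∀ run : Nat, run ≤ 3 →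
      winCheck (List.replicate run p ++ c :: rest) = winCheck (c :: rest) := by
  intro run hrun
  have hne' : ¬ (p = c) := fun h => hne h.symm
  interval_cases run
  · simp [List.replicate]
  · simpa [List.replicate] using winCheck_cons_of_ne hne' rest
  · simp only [List.replicate, List.cons_append, List.nil_append]
    rw [winCheck_cons2_of_ne hne', winCheck_cons_of_ne hne']
  · simp only [List.replicate, List.cons_append, List.nil_append]
    rw [winCheck_cons3_of_ne hne', winCheck_cons2_of_ne hne', winCheck_cons_of_ne hne']

lemma altGo_cons_self (c : Char) (rest : List Char) (run : Int) :
    rule6AltGo (c :: rest) run (some c)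
      = if run + 1 = 4 then false else rule6AltGo rest (run + 1) (some c) := by
  show (if (if some c = some c then run + 1 else 1) = 4 then false
        else rule6AltGo rest (if some c = some c then run + 1 else 1) (some c)) = _
  rw [if_pos rfl]

lemma altGo_cons_ne (c : Char) (rest : List Char) (run : Int) (prev : Option Char)
    (h : ¬ some c = prev) :
    rule6AltGo (c :: rest) run prev = rule6AltGo rest 1 (some c) := by
  show (if (if some c = prev then run + 1 else 1) = 4 then false
        else rule6AltGo rest (if some c = prev then run + 1 else 1) (some c)) = _
  rw [if_neg h, if_neg (by norm_num)]

lemma rule6AltGo_eq_winCheck (t : List Char) :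
    ∀ (p : Char) (run : Nat), 1 ≤ run → run ≤ 3 →
      rule6AltGo t (run : Int) (some p) = winCheck (List.replicate run p ++ t) := by
  induction t with
  | nil =>
    intro p run _ hle
    rw [winCheck_short _ (by simp; omega)]
    rfl
  | cons c rest ih =>
    intro p run hge hle
    by_cases hc : c = p
    · subst hc
      rw [altGo_cons_self]
      by_cases h4 : run = 3
      · subst h4
        rw [if_pos (by norm_num)]
        have h3 : List.replicate 3 c ++ c :: rest = c :: c :: c :: c :: rest := by
          simp [List.replicate]
        rw [h3]
        unfold winCheck
        rw [if_pos ⟨rfl, rfl, rfl⟩]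
      · rw [if_neg (by omega),
            show ((run : Int) + 1) = ((run + 1 : Nat) : Int) by omega,
            ih c (run + 1) (by omega) (by omega)]
        congr 1
        simp [List.replicate_succ', List.append_assoc]
    · have hcp : ¬ (some c = some p) := by simpa using hc
      rw [altGo_cons_ne c rest _ _ hcp,
          show ((1 : Int)) = ((1 : Nat) : Int) by norm_num,
          ih c 1 le_rfl (by norm_num),
          winCheck_replicate_ne p c hc rest run hle]
      simp [List.replicate]

lemma rule6AltGo_start (s : List Char) : rule6AltGo s 0 none = winCheck s := by
  cases s with
  | nil => rfl
  | cons c rest =>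
    rw [altGo_cons_ne c rest 0 none (by simp),
        show ((1 : Int)) = ((1 : Nat) : Int) by norm_num,
        rule6AltGo_eq_winCheck rest c 1 le_rfl (by norm_num)]
    simp [List.replicate]

-- ===== VERDICT (by name: the statement is the Claim_ definition above) =====
theorem rule6_spec : Claim_equal_rule6 := by
  intro astring _
  unfold Spec_rule6 rule6 rule6_alt
  rw [rule6AltGo_start]
  exact rule6Go_eq_winCheck _
    (PySem.Chars.join [] (PySem.Chars.splitOn astring.toList ['-'])).length 0 (by omega)
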